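-- pv_equiv track=rewrite | github.com/RIKEN-RCCS/mX_real | Ozaki-QW/s.py | regs_rename
-- ===== SOURCE A (Python) =====
-- def concat ( list, element ) :
--     return '{} {}'.format( list, element )
--
-- def regs_rename( line ) :
--
--     NumRegs = 0
--     for i in range( len(line) ) :
--         if '!' in line[i] :
--             continue
--         a_list = line[i].split()
--         if len(a_list) < 2 :
--             continue
--         if not ( 'e' in line[i] ) :
--             continue
--
--         for j in range( 1, len(a_list) ) :
--             if not ( 'e' in a_list[j] ) :
--                 continue
--
--             t_reg = 't{}'.format( NumRegs )
--             NumRegs = NumRegs + 1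
--
--             for k in range( i, len(line) ) :
--                 if '!' in line[k] :
--                     continue
--                 if not ( 'e' in line[k] ) :
--                     continue
--
--                 b_list = line[k].split()
--                 line[k] = ''
--                 for l in range( len(b_list) ) :
--                     if b_list[l] == a_list[j] :
--                         b_list[l] = t_reg
--                     line[k] = concat( line[k], b_list[l] )
--
--     return ( line, NumRegs )
-- ===== SOURCE B (Python) =====
-- # Same renaming as A, but per source line it builds the token->t-name dict once and
-- # rewrites the following lines in a single sweep, instead of A's one full rescan
-- # per register token.  Mutates `line` in place like A does.
-- def regs_rename(line):
--     num = 0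
--     for i in range(len(line)):
--         s = line[i]
--         if '!' in s or 'e' not in s:
--             continue
--         toks = s.split()
--         if len(toks) < 2:
--             continue
--         ren = {}
--         triggered = False
--         for t in toks[1:]:
--             if 'e' in t:
--                 ren.setdefault(t, 't{}'.format(num))
--                 num += 1
--                 triggered = True
--         if triggered:
--             for k in range(i, len(line)):
--                 if '!' in line[k] or 'e' not in line[k]:
--                     continue
--                 line[k] = ' ' + ' '.join(ren.get(w, w) for w in line[k].split())
--     return (line, num)
-- ===== Notes on version B (the rewrite author's own statement) =====
-- stated objective: alternative
-- what changed: Per qualifying source line B builds a token-to-t-name dict once (setdefault per register token) and rewrites the current and following lines in a single sweep, instead of A's separate full rescan-and-rewrite of all later lines for every single register token.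
import Mathlib
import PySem

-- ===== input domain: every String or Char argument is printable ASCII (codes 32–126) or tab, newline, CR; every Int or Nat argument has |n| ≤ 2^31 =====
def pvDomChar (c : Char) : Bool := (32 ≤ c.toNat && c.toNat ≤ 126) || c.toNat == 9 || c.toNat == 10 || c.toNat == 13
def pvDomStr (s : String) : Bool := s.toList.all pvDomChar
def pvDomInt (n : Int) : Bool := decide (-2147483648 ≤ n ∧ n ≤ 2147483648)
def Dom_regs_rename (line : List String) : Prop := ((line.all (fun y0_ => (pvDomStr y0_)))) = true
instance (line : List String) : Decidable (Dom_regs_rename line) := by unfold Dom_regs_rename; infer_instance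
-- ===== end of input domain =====

-- B replaces A's per-register-token rescan of all later lines by one dict built per
-- qualifying line plus a single rewrite sweep (same return value; like A, the Python B
-- mutates `line` in place — the equivalence proved here is about the return value).

-- ===== PORT A =====
-- '{} {}'.format(list, element)
def concatA (l e : String) : String := l ++ " " ++ e

-- literal port of A; loops become foldl over the same index ranges, list mutation
-- becomes List.set; all indices are in range in A, so line[i] is `getD i ""`.
def regs_rename (line : List String) : List String × Int :=
  (List.range line.length).foldl (fun st i =>
    let s := st.1.getD i ""
    if PySem.Str.isIn "!" s then st
    else
      let aList := PySem.Str.split₀ s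
      if aList.length < 2 then st
      else if !(PySem.Str.isIn "e" s) then st
      else
        (List.range' 1 (aList.length - 1)).foldl (fun st2 j =>
          let aj := aList.getD j ""
          if !(PySem.Str.isIn "e" aj) then st2
          else
            let tReg := "t" ++ PySem.Int.toStr st2.2
            ((List.range' i (line.length - i)).foldl (fun ls k =>
              let sk := ls.getD k ""
              if PySem.Str.isIn "!" sk then ls
              else if !(PySem.Str.isIn "e" sk) then ls
              else
                ls.set k ((PySem.Str.split₀ sk).foldl (fun acc w =>
                  concatA acc (if w == aj then tReg else w)) "")) st2.1,
             st2.2 + 1)) st)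
    (line, 0)

-- ===== PORT B =====
-- ' ' + ' '.join(ren.get(w, w) for w in s.split())
def lineSub (ren : PySem.Dict String String) (s : String) : String :=
  " " ++ PySem.Str.join " " ((PySem.Str.split₀ s).map (fun w => ren.getD w w))

-- literal port of Source B  (toks[1:] with the nonnegative literal 1 is toks.tail)
def regs_rename_alt (line : List String) : List String × Int :=
  (List.range line.length).foldl (fun st i =>
    let s := st.1.getD i ""
    if PySem.Str.isIn "!" s || !(PySem.Str.isIn "e" s) then st
    else
      let toks := PySem.Str.split₀ s
      if toks.length < 2 then st
      else
        let acc := toks.tail.foldl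
          (fun (p : PySem.Dict String String × Int × Bool) t =>
            if PySem.Str.isIn "e" t then
              (p.1.setdefault t ("t" ++ PySem.Int.toStr p.2.1), p.2.1 + 1, true)
            else p)
          (PySem.Dict.empty, st.2, false)
        if acc.2.2 then
          ((List.range' i (line.length - i)).foldl (fun ls k =>
            let sk := ls.getD k ""
            if PySem.Str.isIn "!" sk || !(PySem.Str.isIn "e" sk) then ls
            else ls.set k (lineSub acc.1 sk)) st.1,
           acc.2.1)
        else st)
    (line, 0)

-- ===== PRECONDITION & SPEC =====
def Spec_regs_rename (line : List String) (out : List String × Int) : Prop := out = regs_rename_alt line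
instance (line : List String) (out : List String × Int) : Decidable (Spec_regs_rename line out) := by unfold Spec_regs_rename; infer_instance

-- ===== CLAIM (what is proved, stated in full; the proofs are below) =====
def Claim_equal_regs_rename : Prop := ∀ (line : List String), Dom_regs_rename line → Spec_regs_rename line (regs_rename line)

-- ===== LEMMAS AND PROOFS =====

-- proof-side names ---------------------------------------------------------

/-- A t-name: "t" followed by the decimal form of an integer. -/
def IsTName (v : String) : Prop := ∃ z : Int, v = "t" ++ PySem.Int.toStr z

/-- B's per-line rewrite including the skip guards. -/
def Fg (m : PySem.Dict String String) (s : String) : String :=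
  if PySem.Str.isIn "!" s || !(PySem.Str.isIn "e" s) then s else lineSub m s

/-- A's per-line update for one register token `t` renamed to `r`, guards included. -/
def updA (t r : String) (cur : String) : String :=
  if PySem.Str.isIn "!" cur then cur
  else if !(PySem.Str.isIn "e" cur) then cur
  else (PySem.Str.split₀ cur).foldl (fun acc w => concatA acc (if w == t then r else w)) ""

-- generic fold lemmas ------------------------------------------------------

theorem foldl_range'_getD {σ α : Type} (g : σ → α → σ) (d : α) (xs : List α) :
    ∀ (k : Nat) (s : σ), k ≤ xs.length →
      (List.range' k (xs.length - k)).foldl (fun st j => g st (xs.getD j d)) s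
        = (xs.drop k).foldl g s := by
  intro k
  induction hn : xs.length - k generalizing k with
  | zero =>
    intro s hk
    have : xs.length ≤ k := by omega
    simp [List.drop_eq_nil_of_le this]
  | succ m ih =>
    intro s hk
    have hklt : k < xs.length := by omega
    rw [List.range'_succ, List.foldl_cons, List.drop_eq_getElem_cons hklt, List.foldl_cons,
        List.getD_eq_getElem xs d hklt]
    exact ih (k+1) (by omega) _ (by omega)

theorem foldl_set_map (u : String → String) (g : List String → Nat → List String)
    (hg : ∀ ls k, k < ls.length → g ls k = ls.set k (u (ls.getD k ""))) :
    ∀ (m i : Nat) (ls : List String), i + m = ls.length →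
      (List.range' i m).foldl g ls = ls.take i ++ (ls.drop i).map u := by
  intro m
  induction m with
  | zero =>
    intro i ls h
    have : ls.length ≤ i := by omega
    simp [List.take_of_length_le this, List.drop_eq_nil_of_le this]
  | succ m ih =>
    intro i ls h
    have hilt : i < ls.length := by omega
    rw [List.range'_succ, List.foldl_cons, hg ls i hilt]
    have hset : ls.set i (u (ls.getD i "")) =
        (ls.take i ++ [u (ls.getD i "")]) ++ ls.drop (i+1) := by
      rw [List.set_eq_take_append_cons_drop]; simp [hilt]
    rw [hset]
    rw [ih (i+1) _ (by simp; omega)]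
    rw [List.take_append_of_le_length (by simp <;> omega), List.drop_append_of_le_length (by simp <;> omega)]
    have h1 : List.take (i+1) (ls.take i ++ [u (ls.getD i "")]) = ls.take i ++ [u (ls.getD i "")] := by
      apply List.take_of_length_le; simp <;> omega
    have h2 : List.drop (i+1) (ls.take i ++ [u (ls.getD i "")]) = [] := by
      apply List.drop_eq_nil_of_le; simp <;> omega
    rw [h1, h2]
    rw [List.drop_eq_getElem_cons hilt, List.map_cons, List.getD_eq_getElem ls "" hilt]
    simp

-- string-membership lemmas -------------------------------------------------

theorem toList_inj' {x y : String} (h : x.toList = y.toList) : x = y := by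
  have := congrArg String.ofList h
  simpa using this

theorem isIn_singleton (c : Char) (s : List Char) :
    PySem.Chars.isIn [c] s = true ↔ c ∈ s := by
  rw [PySem.Chars.isIn_iff_infix]
  constructor
  · intro h; exact h.subset (by simp)
  · intro h
    obtain ⟨l, r, rfl⟩ := List.append_of_mem h
    exact ⟨l, r, by simp⟩

-- character-class lemmas ---------------------------------------------------

theorem isspace_false_of (c : Char) (h : 45 ≤ c.toNat ∧ c.toNat ≤ 57 ∨ c.toNat = 116) :
    PySem.Chars.isspace c = false := by
  simp only [PySem.Chars.isspace]
  simp only [Bool.or_eq_false_iff, Bool.and_eq_false_iff, decide_eq_false_iff_not]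
  omega

theorem tName_chars {v : String} (hv : IsTName v) :
    v.toList ≠ [] ∧ ∀ c ∈ v.toList, PySem.Chars.isspace c = false ∧ c ≠ 'e' ∧ c ≠ '!' := by
  obtain ⟨z, rfl⟩ := hv
  have htl : ("t" ++ PySem.Int.toStr z).toList = 't' :: PySem.Int.toChars z := by
    simp [PySem.Int.toStr]
  rw [htl]
  refine ⟨by simp, ?_⟩
  intro c hc
  have hcase : c = 't' ∨ c.isDigit = true ∨ c = '-' := by
    rcases List.mem_cons.mp hc with h | h
    · exact Or.inl h
    · right
      unfold PySem.Int.toChars at h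
      split at h
      · rcases List.mem_cons.mp h with h' | h'
        · exact Or.inr h'
        · exact Or.inl (Nat.isDigit_of_mem_toDigits (by norm_num) (by norm_num) h')
      · exact Or.inl (Nat.isDigit_of_mem_toDigits (by norm_num) (by norm_num) h)
  have hrange : 45 ≤ c.toNat ∧ c.toNat ≤ 57 ∨ c.toNat = 116 := by
    rcases hcase with rfl | hd | rfl
    · right; rfl
    · simp [Char.isDigit] at hd
      obtain ⟨h1, h2⟩ := hd
      rw [UInt32.le_iff_toNat_le] at h1 h2
      have h1' : (48:Nat) ≤ c.toNat := h1
      have h2' : c.toNat ≤ 57 := h2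
      left; exact ⟨by omega, h2'⟩
    · left; exact ⟨by decide, by decide⟩
  refine ⟨isspace_false_of c hrange, ?_, ?_⟩
  · intro rfl; revert hrange; decide
  · intro rfl; revert hrange; decide

-- split₀ lemmas ------------------------------------------------------------

theorem go_cons (c : Char) (rest cur : List Char) (acc : List (List Char)) :
    PySem.Chars.split₀.go (c :: rest) cur acc =
      if PySem.Chars.isspace c then
        (if cur.isEmpty then PySem.Chars.split₀.go rest [] acc
         else PySem.Chars.split₀.go rest [] (cur.reverse :: acc))
      else PySem.Chars.split₀.go rest (c :: cur) acc := by
  simp [PySem.Chars.split₀.go]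

theorem go_nil (cur : List Char) (acc : List (List Char)) :
    PySem.Chars.split₀.go [] cur acc =
      if cur.isEmpty then acc.reverse else (cur.reverse :: acc).reverse := by
  simp [PySem.Chars.split₀.go]

theorem go_tokens (Q : Char → Prop) :
    ∀ (cs cur : List Char) (acc : List (List Char)),
      (∀ c ∈ cur, Q c ∧ PySem.Chars.isspace c = false) →
      (∀ c ∈ cs, PySem.Chars.isspace c = false → Q c) →
      ∀ t ∈ PySem.Chars.split₀.go cs cur acc,
        t ∈ acc ∨ (t ≠ [] ∧ ∀ c ∈ t, Q c ∧ PySem.Chars.isspace c = false) := by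
  intro cs
  induction cs with
  | nil =>
    intro cur acc hcur _ t ht
    rw [go_nil] at ht
    cases hemp : cur.isEmpty with
    | true => rw [if_pos (by simp [hemp])] at ht; exact Or.inl (by simpa using ht)
    | false =>
      rw [if_neg (by simp [hemp])] at ht
      rw [List.reverse_cons', List.concat_eq_append] at ht
      rcases List.mem_append.mp ht with h | h
      · exact Or.inl (by simpa using h)
      · right
        have hne : cur ≠ [] := by simpa [List.isEmpty_iff] using hemp
        simp at h
        subst h
        exact ⟨by simpa using hne, fun c hc => hcur c (by simpa using hc)⟩
  | cons c0 rest ih =>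
    intro cur acc hcur hcs t ht
    rw [go_cons] at ht
    by_cases hsp : PySem.Chars.isspace c0
    · rw [if_pos hsp] at ht
      cases hemp : cur.isEmpty with
      | true =>
        rw [if_pos (by simp [hemp])] at ht
        exact ih [] acc (by simp) (fun c hc h => hcs c (by simp [hc]) h) t ht
      | false =>
        rw [if_neg (by simp [hemp])] at ht
        rcases ih [] (cur.reverse :: acc) (by simp) (fun c hc h => hcs c (by simp [hc]) h) t ht with h | h
        · rcases List.mem_cons.mp h with h' | h'
          · right
            subst h'
            have hne : cur ≠ [] := by simpa [List.isEmpty_iff] using hemp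
            exact ⟨by simpa using hne, fun c hc => hcur c (by simpa using hc)⟩
          · exact Or.inl h'
        · exact Or.inr h
    · rw [if_neg hsp] at ht
      refine ih (c0 :: cur) acc ?_ (fun c hc h => hcs c (by simp [hc]) h) t ht
      intro c hc
      rcases List.mem_cons.mp hc with rfl | h'
      · exact ⟨hcs c (by simp) (by simpa using hsp), by simpa using hsp⟩
      · exact hcur c h'

theorem split₀_tokens (s : List Char) :
    ∀ t ∈ PySem.Chars.split₀ s, t ≠ [] ∧ ∀ c ∈ t, PySem.Chars.isspace c = false ∧ c ∈ s := by
  intro t ht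
  have := go_tokens (fun c => c ∈ s) s [] [] (by simp) (fun c hc _ => hc) t ht
  rcases this with h | h
  · simp at h
  · exact ⟨h.1, fun c hc => ⟨(h.2 c hc).2, (h.2 c hc).1⟩⟩

theorem go_acc_sub : ∀ (cs cur : List Char) (acc : List (List Char)) (t : List Char),
    t ∈ acc → t ∈ PySem.Chars.split₀.go cs cur acc := by
  intro cs
  induction cs with
  | nil =>
    intro cur acc t h
    rw [go_nil]
    cases hemp : cur.isEmpty with
    | true => rw [if_pos (by simp [hemp])]; simpa using h
    | false => rw [if_neg (by simp [hemp])]; simp [h]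
  | cons c0 rest ih =>
    intro cur acc t h
    rw [go_cons]
    by_cases hsp : PySem.Chars.isspace c0
    · rw [if_pos hsp]
      cases hemp : cur.isEmpty with
      | true => rw [if_pos (by simp [hemp])]; exact ih _ _ t h
      | false => rw [if_neg (by simp [hemp])]; exact ih _ _ t (by simp [h])
    · rw [if_neg hsp]; exact ih _ _ t h

theorem go_cover : ∀ (cs cur : List Char) (acc : List (List Char)) (c : Char),
    (c ∈ cur ∨ (c ∈ cs ∧ PySem.Chars.isspace c = false)) →
    ∃ t ∈ PySem.Chars.split₀.go cs cur acc, c ∈ t := by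
  intro cs
  induction cs with
  | nil =>
    intro cur acc c h
    rcases h with h | h
    · have hne : cur.isEmpty = false := by
        cases hemp : cur.isEmpty
        · rfl
        · rw [List.isEmpty_iff] at hemp; subst hemp; simp at h
      rw [go_nil, if_neg (by simp [hne])]
      exact ⟨cur.reverse, by simp, by simpa using h⟩
    · simp at h
  | cons c0 rest ih =>
    intro cur acc c h
    rw [go_cons]
    by_cases hsp : PySem.Chars.isspace c0
    · rw [if_pos hsp]
      have hc : c ∈ cur ∨ (c ∈ rest ∧ PySem.Chars.isspace c = false) := by
        rcases h with h | h
        · exact Or.inl h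
        · rcases List.mem_cons.mp h.1 with rfl | h'
          · rw [h.2] at hsp; simp at hsp
          · exact Or.inr ⟨h', h.2⟩
      cases hemp : cur.isEmpty with
      | true =>
        rw [if_pos (by simp [hemp])]
        rcases hc with h' | h'
        · rw [List.isEmpty_iff] at hemp; subst hemp; simp at h'
        · exact ih [] acc c (Or.inr h')
      | false =>
        rw [if_neg (by simp [hemp])]
        rcases hc with h' | h'
        · exact ⟨cur.reverse, go_acc_sub _ _ _ _ (by simp), by simpa using h'⟩
        · exact ih [] _ c (Or.inr h')
    · rw [if_neg hsp]
      rcases h with h | h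
      · exact ih (c0 :: cur) acc c (Or.inl (by simp [h]))
      · rcases List.mem_cons.mp h.1 with h2 | h'
        · exact ih (c0 :: cur) acc c (Or.inl (by simp [h2]))
        · exact ih (c0 :: cur) acc c (Or.inr ⟨h', h.2⟩)

theorem split₀_cover (s : List Char) (c : Char) (hc : c ∈ s)
    (hs : PySem.Chars.isspace c = false) : ∃ t ∈ PySem.Chars.split₀ s, c ∈ t :=
  go_cover s [] [] c (Or.inr ⟨hc, hs⟩)

theorem isspace_space : PySem.Chars.isspace ' ' = true := by decide

theorem go_token : ∀ (t cs cur : List Char) (acc : List (List Char)),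
    (∀ c ∈ t, PySem.Chars.isspace c = false) →
    PySem.Chars.split₀.go (t ++ cs) cur acc = PySem.Chars.split₀.go cs (t.reverse ++ cur) acc := by
  intro t
  induction t with
  | nil => intro cs cur acc _; simp
  | cons c0 t' ih =>
    intro cs cur acc h
    rw [List.cons_append, go_cons, if_neg (by simp [h c0 (by simp)])]
    rw [ih cs (c0 :: cur) acc (fun c hc => h c (by simp [hc]))]
    simp

theorem join_eq_nil : PySem.Chars.join [' '] [] = [] := by simp [PySem.Chars.join, List.intercalate]
theorem join_eq_single (t : List Char) : PySem.Chars.join [' '] [t] = t := by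
  simp [PySem.Chars.join, List.intercalate]
theorem join_eq_cons (a b : List Char) (l : List (List Char)) :
    PySem.Chars.join [' '] (a :: b :: l) = a ++ ' ' :: PySem.Chars.join [' '] (b :: l) := by
  simp [PySem.Chars.join, List.intercalate, List.intersperse, List.flatten]

theorem go_join : ∀ (ts : List (List Char)) (acc : List (List Char)),
    (∀ t ∈ ts, t ≠ [] ∧ ∀ c ∈ t, PySem.Chars.isspace c = false) →
    PySem.Chars.split₀.go (PySem.Chars.join [' '] ts) [] acc = acc.reverse ++ ts := by
  intro ts
  induction ts with
  | nil => intro acc _; rw [join_eq_nil, go_nil]; simp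
  | cons t ts' ih =>
    intro acc h
    have ht := h t (by simp)
    cases ts' with
    | nil =>
      rw [join_eq_single, ← List.append_nil t, go_token t [] [] acc ht.2, go_nil]
      rw [if_neg (by simp [ht.1])]
      simp
    | cons b l =>
      rw [join_eq_cons, go_token t _ [] acc ht.2, go_cons, if_pos isspace_space,
          if_neg (by simp [ht.1])]
      rw [show (t.reverse ++ ([] : List Char)).reverse :: acc = t :: acc by simp]
      rw [ih (t :: acc) (fun u hu => h u (by simp [hu]))]
      simp

theorem split₀_join (ts : List (List Char))
    (h : ∀ t ∈ ts, t ≠ [] ∧ ∀ c ∈ t, PySem.Chars.isspace c = false) :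
    PySem.Chars.split₀ (' ' :: PySem.Chars.join [' '] ts) = ts := by
  unfold PySem.Chars.split₀
  rw [go_cons, if_pos isspace_space, if_pos (by simp)]
  rw [go_join ts [] h]
  simp

theorem mem_join_elim (ts : List (List Char)) (c : Char)
    (h : c ∈ PySem.Chars.join [' '] ts) : c = ' ' ∨ ∃ t ∈ ts, c ∈ t := by
  induction ts with
  | nil => rw [join_eq_nil] at h; simp at h
  | cons t ts' ih =>
    cases ts' with
    | nil => rw [join_eq_single] at h; exact Or.inr ⟨t, by simp, h⟩
    | cons b l =>
      rw [join_eq_cons] at h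
      rcases List.mem_append.mp h with h' | h'
      · exact Or.inr ⟨t, by simp, h'⟩
      · rcases List.mem_cons.mp h' with rfl | h''
        · exact Or.inl rfl
        · rcases ih h'' with h3 | ⟨u, hu, hcu⟩
          · exact Or.inl h3
          · exact Or.inr ⟨u, by simp [hu], hcu⟩

theorem mem_join_of (ts : List (List Char)) (c : Char) (t : List Char)
    (ht : t ∈ ts) (hc : c ∈ t) : c ∈ PySem.Chars.join [' '] ts := by
  induction ts with
  | nil => simp at ht
  | cons a ts' ih =>
    cases ts' with
    | nil =>
      rw [join_eq_single]
      rcases List.mem_cons.mp ht with rfl | h'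
      · exact hc
      · simp at h'
    | cons b l =>
      rw [join_eq_cons]
      rcases List.mem_cons.mp ht with rfl | h'
      · exact List.mem_append.mpr (Or.inl hc)
      · exact List.mem_append.mpr (Or.inr (List.mem_cons.mpr (Or.inr (ih h'))))

-- rebuild lemma ------------------------------------------------------------

theorem fold_concat_toList : ∀ (vs : List String) (acc : String),
    (vs.foldl concatA acc).toList = acc.toList ++ (vs.map (fun v => ' ' :: v.toList)).flatten := by
  intro vs
  induction vs with
  | nil => intro acc; simp
  | cons v vs' ih =>
    intro acc
    rw [List.foldl_cons, ih]
    simp [concatA]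

theorem flatten_space : ∀ (v : List Char) (l : List (List Char)),
    (List.map (fun t => ' ' :: t) (v :: l)).flatten = ' ' :: PySem.Chars.join [' '] (v :: l) := by
  intro v l
  induction l generalizing v with
  | nil => simp [join_eq_single]
  | cons b l' ih =>
    rw [join_eq_cons]
    simp only [List.map_cons, List.flatten_cons] at ih ⊢
    have := ih b
    simp only [List.map_cons, List.flatten_cons] at this
    rw [this]
    simp

theorem rebuild_eq (vs : List String) (hvs : vs ≠ []) :
    vs.foldl concatA "" = " " ++ PySem.Str.join " " vs := by
  apply toList_inj'
  rw [fold_concat_toList]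
  cases vs with
  | nil => simp at hvs
  | cons v vs' =>
    rw [show (List.map (fun v : String => ' ' :: v.toList) (v :: vs')) =
        List.map (fun t => ' ' :: t) (List.map String.toList (v :: vs')) by simp]
    rw [show List.map String.toList (v :: vs') = v.toList :: List.map String.toList vs' from rfl,
        flatten_space]
    simp [PySem.Str.toList_join]

-- per-line helper lemmas ---------------------------------------------------

theorem str_tokens (s : String) :
    ∀ w ∈ PySem.Str.split₀ s,
      w.toList ≠ [] ∧ ∀ c ∈ w.toList, PySem.Chars.isspace c = false ∧ c ∈ s.toList := by
  intro w hw
  rw [PySem.Str.split₀] at hw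
  obtain ⟨t, ht, rfl⟩ := List.mem_map.mp hw
  have := split₀_tokens s.toList t ht
  simpa using this

theorem str_split_cover (s : String) (he : 'e' ∈ s.toList) :
    ∃ w ∈ PySem.Str.split₀ s, 'e' ∈ w.toList := by
  obtain ⟨t, ht, hc⟩ := split₀_cover s.toList 'e' he (by decide)
  exact ⟨String.ofList t, by rw [PySem.Str.split₀]; exact List.mem_map.mpr ⟨t, ht, rfl⟩,
    by simpa using hc⟩

theorem str_split_ne (s : String) (he : 'e' ∈ s.toList) : PySem.Str.split₀ s ≠ [] := by
  obtain ⟨w, hw, _⟩ := str_split_cover s he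
  intro h; rw [h] at hw; simp at hw

theorem lineSub_toList (m : PySem.Dict String String) (s : String) :
    (lineSub m s).toList =
      ' ' :: PySem.Chars.join [' ']
        (((PySem.Str.split₀ s).map (fun w => m.getD w w)).map String.toList) := by
  simp [lineSub, PySem.Str.toList_join]

theorem getD_good (m : PySem.Dict String String) (hm : ∀ w v, m.get? w = some v → IsTName v)
    (s : String) (w : String) (hw : w ∈ PySem.Str.split₀ s) :
    (m.getD w w).toList ≠ [] ∧ ∀ c ∈ (m.getD w w).toList, PySem.Chars.isspace c = false := by
  rw [PySem.Dict.getD_eq_get?_getD]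
  cases hg : m.get? w with
  | none =>
    have := str_tokens s w hw
    exact ⟨this.1, fun c hc => (this.2 c hc).1⟩
  | some v =>
    have := tName_chars (hm w v hg)
    exact ⟨this.1, fun c hc => (this.2 c hc).1⟩

theorem split₀_lineSub (m : PySem.Dict String String)
    (hm : ∀ w v, m.get? w = some v → IsTName v) (s : String) :
    PySem.Str.split₀ (lineSub m s) = (PySem.Str.split₀ s).map (fun w => m.getD w w) := by
  rw [PySem.Str.split₀, lineSub_toList]
  rw [split₀_join]
  · rw [List.map_map]
    simp
  · intro t ht
    obtain ⟨v, hv, rfl⟩ := List.mem_map.mp ht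
    obtain ⟨w0, hw0, rfl⟩ := List.mem_map.mp hv
    exact getD_good m hm s w0 hw0

theorem bang_lineSub (m : PySem.Dict String String)
    (hm : ∀ w v, m.get? w = some v → IsTName v) (s : String)
    (hbang : PySem.Chars.isIn ['!'] s.toList = false) :
    PySem.Chars.isIn ['!'] (lineSub m s).toList = false := by
  rw [← Bool.not_eq_true]
  intro h
  rw [isIn_singleton, lineSub_toList] at h
  rcases List.mem_cons.mp h with h' | h'
  · exact absurd h' (by decide)
  · rcases mem_join_elim _ _ h' with h'' | ⟨t, ht, hct⟩
    · exact absurd h'' (by decide)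
    · obtain ⟨v, hv, rfl⟩ := List.mem_map.mp ht
      obtain ⟨w0, hw0, rfl⟩ := List.mem_map.mp hv
      revert hct
      rw [PySem.Dict.getD_eq_get?_getD]
      cases hg : m.get? w0 with
      | none =>
        intro hct
        simp only [Option.getD_none] at hct
        have hmem := ((str_tokens s w0 hw0).2 '!' hct).2
        have : PySem.Chars.isIn ['!'] s.toList = true := (isIn_singleton '!' s.toList).mpr hmem
        rw [this] at hbang; cases hbang
      | some v =>
        intro hct
        simp only [Option.getD_some] at hct
        exact absurd rfl ((tName_chars (hm w0 v hg)).2 '!' hct).2.2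

theorem e_lineSub (m : PySem.Dict String String)
    (hm : ∀ w v, m.get? w = some v → IsTName v) (s : String) :
    PySem.Chars.isIn ['e'] (lineSub m s).toList = true ↔
      ∃ w ∈ PySem.Str.split₀ s, m.get? w = none ∧ 'e' ∈ w.toList := by
  rw [isIn_singleton, lineSub_toList]
  constructor
  · intro h
    rcases List.mem_cons.mp h with h' | h'
    · exact absurd h' (by decide)
    · rcases mem_join_elim _ _ h' with h'' | ⟨t, ht, hct⟩
      · exact absurd h'' (by decide)
      · obtain ⟨v, hv, rfl⟩ := List.mem_map.mp ht
        obtain ⟨w0, hw0, rfl⟩ := List.mem_map.mp hv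
        refine ⟨w0, hw0, ?_⟩
        revert hct
        rw [PySem.Dict.getD_eq_get?_getD]
        cases hg : m.get? w0 with
        | none => intro hct; simpa using hct
        | some v =>
          intro hct
          simp only [Option.getD_some] at hct
          exact absurd rfl ((tName_chars (hm w0 v hg)).2 'e' hct).2.1
  · rintro ⟨w, hw, hnone, he⟩
    apply List.mem_cons.mpr
    right
    apply mem_join_of _ _ (m.getD w w).toList
    · exact List.mem_map.mpr ⟨m.getD w w, List.mem_map.mpr ⟨w, hw, rfl⟩, rfl⟩
    · rw [PySem.Dict.getD_eq_get?_getD, hnone]; simpa using he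

theorem repl_getD (m : PySem.Dict String String)
    (hm : ∀ w v, m.get? w = some v → IsTName v) (t r : String) (ht : 'e' ∈ t.toList)
    (w : String) :
    (if m.getD w w == t then r else m.getD w w) = (m.setdefault t r).getD w w := by
  by_cases hwt : w = t
  · rw [hwt]
    rw [PySem.Dict.getD_eq_get?_getD, PySem.Dict.getD_eq_get?_getD, PySem.Dict.get?_setdefault_self]
    cases hg : m.get? t with
    | none => simp
    | some v =>
      have hv := tName_chars (hm t v hg)
      have hvt : v ≠ t := fun h => (hv.2 'e' (h ▸ ht)).2.1 rfl
      simp [hvt]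
  · rw [PySem.Dict.getD_eq_get?_getD, PySem.Dict.getD_eq_get?_getD,
        PySem.Dict.get?_setdefault_of_ne m r hwt]
    cases hg : m.get? w with
    | none => simp [hwt]
    | some v =>
      have hv := tName_chars (hm w v hg)
      have hvt : v ≠ t := fun h => (hv.2 'e' (h ▸ ht)).2.1 rfl
      simp [hvt]

theorem foldl_concat_map (f : String → String) (ws : List String) (acc : String) :
    ws.foldl (fun a w => concatA a (f w)) acc = (ws.map f).foldl concatA acc := by
  rw [List.foldl_map]

-- the two per-line lemmas --------------------------------------------------

theorem empty_hm : ∀ w v, (PySem.Dict.empty : PySem.Dict String String).get? w = some v → IsTName v := by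
  intro w v h; rw [PySem.Dict.get?_empty] at h; cases h

theorem updA_orig (t r s : String) (ht : 'e' ∈ t.toList) (hr : IsTName r) :
    updA t r s = Fg (PySem.Dict.empty.setdefault t r) s := by
  by_cases hbang : PySem.Chars.isIn ['!'] s.toList = true
  · rw [updA, if_pos (by simpa [PySem.Str.isIn] using hbang), Fg, if_pos (by simp [PySem.Str.isIn, hbang])]
  · replace hbang : PySem.Chars.isIn ['!'] s.toList = false := by simpa using hbang
    by_cases he : PySem.Chars.isIn ['e'] s.toList = true
    · have hel : 'e' ∈ s.toList := (isIn_singleton 'e' s.toList).mp he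
      have hne := str_split_ne s hel
      rw [updA, if_neg (by simp [PySem.Str.isIn, hbang]), if_neg (by simp [PySem.Str.isIn, he])]
      rw [Fg, if_neg (by simp [PySem.Str.isIn, hbang, he])]
      rw [foldl_concat_map, rebuild_eq _ (by simpa using hne), lineSub]
      congr 2
      apply List.map_congr_left
      intro w _
      have h := repl_getD PySem.Dict.empty empty_hm t r ht w
      simpa [PySem.Dict.getD_empty] using h
    · replace he : PySem.Chars.isIn ['e'] s.toList = false := by simpa using he
      rw [updA, if_neg (by simp [PySem.Str.isIn, hbang]), if_pos (by simp [PySem.Str.isIn, he]),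
          Fg, if_pos (by simp [PySem.Str.isIn, he])]

theorem updA_mapped (m : PySem.Dict String String) (t r s : String)
    (hm : ∀ w v, m.get? w = some v → IsTName v) (ht : 'e' ∈ t.toList) (hr : IsTName r) :
    updA t r (Fg m s) = Fg (m.setdefault t r) s := by
  by_cases hbang : PySem.Chars.isIn ['!'] s.toList = true
  · rw [Fg, if_pos (by simp [PySem.Str.isIn, hbang])]
    rw [show Fg (m.setdefault t r) s = s by rw [Fg, if_pos (by simp [PySem.Str.isIn, hbang])]]
    rw [updA, if_pos (by simpa [PySem.Str.isIn] using hbang)]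
  · replace hbang : PySem.Chars.isIn ['!'] s.toList = false := by simpa using hbang
    by_cases he : PySem.Chars.isIn ['e'] s.toList = true
    swap
    · replace he : PySem.Chars.isIn ['e'] s.toList = false := by simpa using he
      rw [Fg, if_pos (by simp [PySem.Str.isIn, he])]
      rw [show Fg (m.setdefault t r) s = s by rw [Fg, if_pos (by simp [PySem.Str.isIn, he])]]
      rw [updA, if_neg (by simp [PySem.Str.isIn, hbang]), if_pos (by simp [PySem.Str.isIn, he])]
    · have hel : 'e' ∈ s.toList := (isIn_singleton 'e' s.toList).mp he
      have hne := str_split_ne s hel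
      rw [Fg, if_neg (by simp [PySem.Str.isIn, hbang, he])]
      rw [show Fg (m.setdefault t r) s = lineSub (m.setdefault t r) s by
        rw [Fg, if_neg (by simp [PySem.Str.isIn, hbang, he])]]
      rw [updA, if_neg (by simp [PySem.Str.isIn, bang_lineSub m hm s hbang])]
      by_cases hex : PySem.Chars.isIn ['e'] (lineSub m s).toList = true
      · rw [if_neg (by simp [PySem.Str.isIn, hex])]
        rw [split₀_lineSub m hm s, foldl_concat_map, List.map_map]
        have hmapeq : List.map ((fun w => if w == t then r else w) ∘ fun w => m.getD w w)
            (PySem.Str.split₀ s) = List.map (fun w => (m.setdefault t r).getD w w)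
            (PySem.Str.split₀ s) := by
          apply List.map_congr_left
          intro w _
          exact repl_getD m hm t r ht w
        rw [hmapeq, rebuild_eq _ (by simpa using hne), lineSub]
      · replace hex : PySem.Chars.isIn ['e'] (lineSub m s).toList = false := by simpa using hex
        rw [if_pos (by simp [PySem.Str.isIn, hex])]
        have hno : ¬ ∃ w ∈ PySem.Str.split₀ s, m.get? w = none ∧ 'e' ∈ w.toList := by
          intro h
          rw [(e_lineSub m hm s).mpr h] at hex; cases hex
        rw [lineSub, lineSub]
        congr 2
        apply List.map_congr_left
        intro w hw
        rw [PySem.Dict.getD_eq_get?_getD, PySem.Dict.getD_eq_get?_getD]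
        by_cases hwt : w = t
        · rw [hwt, PySem.Dict.get?_setdefault_self]
          cases hg : m.get? t with
          | none =>
            exfalso
            exact hno ⟨t, hwt ▸ hw, hg, ht⟩
          | some v => simp
        · rw [PySem.Dict.get?_setdefault_of_ne m r hwt]

-- named forms of the ports' loop bodies (definitionally equal to the lambdas) -----

def kA (aj tReg : String) (ls : List String) (k : Nat) : List String :=
  if PySem.Str.isIn "!" (ls.getD k "") then ls
  else if !(PySem.Str.isIn "e" (ls.getD k "")) then ls
  else ls.set k ((PySem.Str.split₀ (ls.getD k "")).foldl (fun acc w =>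
    concatA acc (if w == aj then tReg else w)) "")

def jA (n i : Nat) (st2 : List String × Int) (aj : String) : List String × Int :=
  if !(PySem.Str.isIn "e" aj) then st2
  else ((List.range' i (n - i)).foldl (kA aj ("t" ++ PySem.Int.toStr st2.2)) st2.1, st2.2 + 1)

def iA (n : Nat) (st : List String × Int) (i : Nat) : List String × Int :=
  if PySem.Str.isIn "!" (st.1.getD i "") then st
  else if (PySem.Str.split₀ (st.1.getD i "")).length < 2 then st
  else if !(PySem.Str.isIn "e" (st.1.getD i "")) then st
  else (List.range' 1 ((PySem.Str.split₀ (st.1.getD i "")).length - 1)).foldl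
    (fun st2 j => jA n i st2 ((PySem.Str.split₀ (st.1.getD i "")).getD j "")) st

def pB (p : PySem.Dict String String × Int × Bool) (t : String) :
    PySem.Dict String String × Int × Bool :=
  if PySem.Str.isIn "e" t then
    (p.1.setdefault t ("t" ++ PySem.Int.toStr p.2.1), p.2.1 + 1, true)
  else p

def kB (m : PySem.Dict String String) (ls : List String) (k : Nat) : List String :=
  if PySem.Str.isIn "!" (ls.getD k "") || !(PySem.Str.isIn "e" (ls.getD k "")) then ls
  else ls.set k (lineSub m (ls.getD k ""))

def iB (n : Nat) (st : List String × Int) (i : Nat) : List String × Int :=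
  if PySem.Str.isIn "!" (st.1.getD i "") || !(PySem.Str.isIn "e" (st.1.getD i "")) then st
  else if (PySem.Str.split₀ (st.1.getD i "")).length < 2 then st
  else if ((PySem.Str.split₀ (st.1.getD i "")).tail.foldl pB (PySem.Dict.empty, st.2, false)).2.2 then
    ((List.range' i (n - i)).foldl
      (kB ((PySem.Str.split₀ (st.1.getD i "")).tail.foldl pB (PySem.Dict.empty, st.2, false)).1)
      st.1,
     ((PySem.Str.split₀ (st.1.getD i "")).tail.foldl pB (PySem.Dict.empty, st.2, false)).2.1)
  else st

-- Bool helpers -------------------------------------------------------------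

theorem bfalse_not {b : Bool} (h : b = false) : ¬ (b = true) := by
  rw [h]; exact Bool.false_ne_true

theorem guardB_left {x y : Bool} (h : x = true) : (x || !y) = true := by rw [h]; rfl

theorem guardB_right {x y : Bool} (h : y = false) : (x || !y) = true := by
  rw [h, Bool.not_false, Bool.or_true]

theorem guardB_false {x y : Bool} (hx : x = false) (hy : y = true) : (x || !y) = false := by
  rw [hx, hy]; rfl

theorem bang_not {y : Bool} (h : y = true) : ¬ ((!y) = true) := by
  rw [h, Bool.not_true]; exact Bool.false_ne_true

-- assembly lemmas ----------------------------------------------------------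

theorem hm_setdefault (m : PySem.Dict String String) (t r : String)
    (hm : ∀ w v, m.get? w = some v → IsTName v) (hr : IsTName r) :
    ∀ w v, (m.setdefault t r).get? w = some v → IsTName v := by
  intro w v h
  by_cases hwt : w = t
  · subst hwt
    rw [PySem.Dict.get?_setdefault_self] at h
    cases hg : m.get? w with
    | none => rw [hg] at h; simp at h; exact h ▸ hr
    | some v' => rw [hg] at h; simp at h; exact h ▸ hm w v' hg
  · rw [PySem.Dict.get?_setdefault_of_ne m r hwt] at h
    exact hm w v h

theorem kA_set (aj tReg : String) (ls : List String) (k : Nat) (hk : k < ls.length) :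
    kA aj tReg ls k = ls.set k (updA aj tReg (ls.getD k "")) := by
  rw [kA, updA]
  by_cases h1 : PySem.Str.isIn "!" (ls.getD k "") = true
  · rw [if_pos h1, if_pos h1]
    conv_rhs => rw [List.getD_eq_getElem ls "" hk]
    rw [List.set_getElem_self]
  · rw [if_neg h1, if_neg h1]
    by_cases h2 : (!PySem.Str.isIn "e" (ls.getD k "")) = true
    · rw [if_pos h2, if_pos h2]
      conv_rhs => rw [List.getD_eq_getElem ls "" hk]
      rw [List.set_getElem_self]
    · rw [if_neg h2, if_neg h2]

theorem kB_set (m : PySem.Dict String String) (ls : List String) (k : Nat)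
    (hk : k < ls.length) :
    kB m ls k = ls.set k (Fg m (ls.getD k "")) := by
  rw [kB, Fg]
  by_cases h1 : (PySem.Str.isIn "!" (ls.getD k "") || !(PySem.Str.isIn "e" (ls.getD k ""))) = true
  · rw [if_pos h1, if_pos h1]
    conv_rhs => rw [List.getD_eq_getElem ls "" hk]
    rw [List.set_getElem_self]
  · rw [if_neg h1, if_neg h1]

theorem jA_not_e (n i : Nat) (st2 : List String × Int) (aj : String)
    (h : PySem.Str.isIn "e" aj = false) : jA n i st2 aj = st2 := by
  rw [jA, if_pos (by rw [h]; rfl)]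

theorem jA_e (n i : Nat) (st2 : List String × Int) (aj : String)
    (h : PySem.Str.isIn "e" aj = true)
    (hlen : st2.1.length = n) (hi : i ≤ n) :
    jA n i st2 aj = (st2.1.take i ++ (st2.1.drop i).map
      (updA aj ("t" ++ PySem.Int.toStr st2.2)), st2.2 + 1) := by
  rw [jA, if_neg (bang_not h)]
  rw [foldl_set_map (updA aj ("t" ++ PySem.Int.toStr st2.2)) _
    (fun ls k hk => kA_set aj ("t" ++ PySem.Int.toStr st2.2) ls k hk) (n - i) i st2.1 (by omega)]

theorem pB_e (p : PySem.Dict String String × Int × Bool) (t : String)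
    (h : PySem.Str.isIn "e" t = true) :
    pB p t = (p.1.setdefault t ("t" ++ PySem.Int.toStr p.2.1), p.2.1 + 1, true) := by
  rw [pB, if_pos h]

theorem pB_not_e (p : PySem.Dict String String × Int × Bool) (t : String)
    (h : PySem.Str.isIn "e" t = false) : pB p t = p := by
  rw [pB, if_neg (bfalse_not h)]

theorem pB_trig_mono : ∀ (ts : List String) (p : PySem.Dict String String × Int × Bool),
    p.2.2 = true → (ts.foldl pB p).2.2 = true := by
  intro ts
  induction ts with
  | nil => intro p hp; exact hp
  | cons t ts' ih =>
    intro p hp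
    rw [List.foldl_cons]
    by_cases hte : PySem.Str.isIn "e" t = true
    · rw [pB_e p t hte]; exact ih _ rfl
    · rw [pB_not_e p t (by simpa using hte)]; exact ih _ hp

theorem pB_false_fix : ∀ (ts : List String) (m : PySem.Dict String String) (num : Int),
    (ts.foldl pB (m, num, false)).2.2 = false →
    ts.foldl pB (m, num, false) = (m, num, false) := by
  intro ts
  induction ts with
  | nil => intro m num _; rfl
  | cons t ts' ih =>
    intro m num h
    rw [List.foldl_cons] at h ⊢
    by_cases hte : PySem.Str.isIn "e" t = true
    · rw [pB_e _ t hte] at h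
      rw [pB_trig_mono ts' _ rfl] at h
      cases h
    · rw [pB_not_e _ t (by simpa using hte)] at h ⊢
      exact ih m num h

theorem take_append_left {a b : List String} {i : Nat} (h : a.length = i) :
    (a ++ b).take i = a := by
  rw [List.take_append_of_le_length (by omega), List.take_of_length_le (by omega)]

theorem drop_append_left {a b : List String} {i : Nat} (h : a.length = i) :
    (a ++ b).drop i = b := by
  rw [List.drop_append_of_le_length (by omega), List.drop_eq_nil_of_le (by omega),
      List.nil_append]

-- the per-pass lemma -------------------------------------------------------

theorem pass_eq (n i : Nat) (ls0 : List String) (h0 : ls0.length = n) (hi : i ≤ n) :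
    ∀ (ts : List String) (m : PySem.Dict String String) (num : Int) (trig : Bool),
      (∀ w v, m.get? w = some v → IsTName v) → (trig = false → m = PySem.Dict.empty) →
      ts.foldl (jA n i) ((if trig then ls0.take i ++ (ls0.drop i).map (Fg m) else ls0), num)
      = ((if (ts.foldl pB (m, num, trig)).2.2 then
            ls0.take i ++ (ls0.drop i).map (Fg (ts.foldl pB (m, num, trig)).1)
          else ls0),
         (ts.foldl pB (m, num, trig)).2.1) := by
  intro ts
  induction ts with
  | nil => intro m num trig _ _; rfl
  | cons t ts' ih =>
    intro m num trig hm hempty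
    rw [List.foldl_cons, List.foldl_cons]
    by_cases hte : PySem.Str.isIn "e" t = true
    swap
    · replace hte : PySem.Str.isIn "e" t = false := by simpa using hte
      rw [jA_not_e n i _ t hte, pB_not_e _ t hte]
      exact ih m num trig hm hempty
    · have ht : 'e' ∈ t.toList := by
        have h' : PySem.Chars.isIn ['e'] t.toList = true := by
          simpa [PySem.Str.isIn] using hte
        exact (isIn_singleton 'e' t.toList).mp h'
      rw [pB_e _ t hte]
      have hr : IsTName ("t" ++ PySem.Int.toStr num) := ⟨num, rfl⟩
      cases htr : trig with
      | false =>
        have hme : m = PySem.Dict.empty := hempty htr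
        subst hme
        rw [if_neg Bool.false_ne_true]
        rw [jA_e n i _ t hte (by simpa using h0) hi]
        have hmap : (ls0.drop i).map (updA t ("t" ++ PySem.Int.toStr num))
            = (ls0.drop i).map (Fg (PySem.Dict.empty.setdefault t ("t" ++ PySem.Int.toStr num))) :=
          List.map_congr_left (fun w _ => updA_orig t _ w ht hr)
        rw [hmap]
        have := ih (PySem.Dict.empty.setdefault t ("t" ++ PySem.Int.toStr num)) (num + 1) true
          (hm_setdefault _ _ _ empty_hm hr) (by intro h; cases h)
        rw [if_pos rfl] at this
        exact this
      | true =>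
        rw [if_pos rfl]
        rw [jA_e n i _ t hte (by simp [List.length_take] <;> omega) hi]
        have htake : (ls0.take i ++ (ls0.drop i).map (Fg m)).take i = ls0.take i :=
          take_append_left (by simp [List.length_take]; omega)
        have hdrop : (ls0.take i ++ (ls0.drop i).map (Fg m)).drop i = (ls0.drop i).map (Fg m) :=
          drop_append_left (by simp [List.length_take]; omega)
        show ts'.foldl (jA n i)
            (((ls0.take i ++ (ls0.drop i).map (Fg m)).take i ++
              ((ls0.take i ++ (ls0.drop i).map (Fg m)).drop i).map
                (updA t ("t" ++ PySem.Int.toStr num)), num + 1) : List String × Int) = _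
        rw [htake, hdrop, List.map_map]
        have hmap : (ls0.drop i).map (updA t ("t" ++ PySem.Int.toStr num) ∘ Fg m)
            = (ls0.drop i).map (Fg (m.setdefault t ("t" ++ PySem.Int.toStr num))) :=
          List.map_congr_left (fun w _ => updA_mapped m t _ w hm ht hr)
        rw [hmap]
        have := ih (m.setdefault t ("t" ++ PySem.Int.toStr num)) (num + 1) true
          (hm_setdefault _ _ _ hm hr) (by intro h; cases h)
        rw [if_pos rfl] at this
        exact this

-- the per-step lemma -------------------------------------------------------

theorem step_eq (n : Nat) (st : List String × Int) (i : Nat) (hlen : st.1.length = n)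
    (hi : i < n) : iA n st i = iB n st i := by
  rw [iA, iB]
  by_cases hb : PySem.Str.isIn "!" (st.1.getD i "") = true
  · rw [if_pos hb, if_pos (guardB_left hb)]
  · replace hb : PySem.Str.isIn "!" (st.1.getD i "") = false := by simpa using hb
    rw [if_neg (bfalse_not hb)]
    by_cases he : PySem.Str.isIn "e" (st.1.getD i "") = true
    swap
    · replace he : PySem.Str.isIn "e" (st.1.getD i "") = false := by simpa using he
      rw [if_pos (guardB_right he)]
      by_cases hl : (PySem.Str.split₀ (st.1.getD i "")).length < 2
      · rw [if_pos hl]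
      · rw [if_neg hl, if_pos (by rw [he]; rfl)]
    · rw [if_neg (bfalse_not (guardB_false hb he))]
      by_cases hl : (PySem.Str.split₀ (st.1.getD i "")).length < 2
      · rw [if_pos hl, if_pos hl]
      · rw [if_neg hl, if_neg hl, if_neg (bang_not he)]
        rw [foldl_range'_getD (jA n i) ("" : String) (PySem.Str.split₀ (st.1.getD i "")) 1 st
          (by omega), List.drop_one]
        have hp := pass_eq n i st.1 hlen (by omega)
          (PySem.Str.split₀ (st.1.getD i "")).tail PySem.Dict.empty st.2 false
          empty_hm (fun _ => rfl)
        rw [if_neg Bool.false_ne_true] at hp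
        rw [show (((st.1 : List String), (st.2 : Int)) : List String × Int) = st from rfl] at hp
        rw [hp]
        cases hacc2 : ((PySem.Str.split₀ (st.1.getD i "")).tail.foldl pB
            (PySem.Dict.empty, st.2, false)).2.2 with
        | true =>
          rw [if_pos rfl, if_pos rfl]
          rw [foldl_set_map (Fg ((PySem.Str.split₀ (st.1.getD i "")).tail.foldl pB
              (PySem.Dict.empty, st.2, false)).1) _
            (fun ls k hk => kB_set _ ls k hk) (n - i) i st.1 (by omega)]
        | false =>
          rw [if_neg Bool.false_ne_true, if_neg Bool.false_ne_true]
          rw [pB_false_fix _ PySem.Dict.empty st.2 hacc2]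

-- outer fold ---------------------------------------------------------------

theorem fold_outer (n : Nat) (f g : (List String × Int) → Nat → (List String × Int))
    (hstep : ∀ st i, st.1.length = n → i < n → f st i = g st i)
    (hlen : ∀ st i, st.1.length = n → i < n → (g st i).1.length = n) :
    ∀ (l : List Nat), (∀ i ∈ l, i < n) → ∀ st, st.1.length = n →
      l.foldl f st = l.foldl g st := by
  intro l
  induction l with
  | nil => intro _ st _; rfl
  | cons i l' ih =>
    intro hl st hst
    rw [List.foldl_cons, List.foldl_cons, hstep st i hst (hl i (by simp))]
    exact ih (fun j hj => hl j (by simp [hj])) _ (hlen st i hst (hl i (by simp)))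

theorem iB_len (n : Nat) (st : List String × Int) (i : Nat) (hlen : st.1.length = n)
    (hi : i < n) : (iB n st i).1.length = n := by
  rw [iB]
  by_cases h1 : (PySem.Str.isIn "!" (st.1.getD i "") || !(PySem.Str.isIn "e" (st.1.getD i ""))) = true
  · rw [if_pos h1]; exact hlen
  · rw [if_neg h1]
    by_cases h2 : (PySem.Str.split₀ (st.1.getD i "")).length < 2
    · rw [if_pos h2]; exact hlen
    · rw [if_neg h2]
      cases hacc2 : ((PySem.Str.split₀ (st.1.getD i "")).tail.foldl pB
          (PySem.Dict.empty, st.2, false)).2.2 with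
      | true =>
        rw [if_pos rfl]
        show ((List.range' i (n - i)).foldl (kB _) st.1).length = n
        rw [foldl_set_map (Fg ((PySem.Str.split₀ (st.1.getD i "")).tail.foldl pB
            (PySem.Dict.empty, st.2, false)).1) _
          (fun ls k hk => kB_set _ ls k hk) (n - i) i st.1 (by omega)]
        simp [List.length_take]
        omega
      | false =>
        rw [if_neg Bool.false_ne_true]; exact hlen

-- ===== VERDICT (by name: the statement is the Claim_ definition above) =====
theorem regs_rename_spec : Claim_equal_regs_rename := by
  intro line _
  show regs_rename line = regs_rename_alt line
  show (List.range line.length).foldl (iA line.length) (line, 0)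
      = (List.range line.length).foldl (iB line.length) (line, 0)
  exact fold_outer line.length (iA line.length) (iB line.length)
    (fun st i h1 h2 => step_eq line.length st i h1 h2)
    (fun st i h1 h2 => iB_len line.length st i h1 h2)
    (List.range line.length) (fun i hi => List.mem_range.mp hi) (line, 0) rfl
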